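-- pv_equiv track=rewrite | github.com/SantoshNaranap/nexus_data_s3 | backend/app/services/source_detector.py | _get_suggested_approach
-- ===== SOURCE A (Python) =====
-- def _get_suggested_approach(datasource: str, query: str) -> str:
--     """
--     Generate a suggested approach for querying a data source.
--
--     Provides guidance to the agent on how to query this source.
--     """
--     query_lower = query.lower()
--
--     if datasource == "s3":
--         if "content" in query_lower or "read" in query_lower:
--             return "List buckets, then objects, then read specific files"
--         return "Use list_buckets to see available storage"
--
--     elif datasource == "mysql":
--         if "table" in query_lower:
--             return "Use list_tables to see database schema"
--         return "Use execute_query with appropriate SELECT statement"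
--
--     elif datasource == "jira":
--         if any(name in query_lower for name in ["working on", "assigned", "who"]):
--             return "Use query_jira with natural language to find assignee info"
--         return "Use query_jira tool with the natural language query"
--
--     elif datasource == "shopify":
--         if "order" in query_lower:
--             return "Use list_orders with appropriate filters"
--         return "Use list_products or search_products"
--
--     elif datasource == "google_workspace":
--         if "email" in query_lower or "gmail" in query_lower:
--             return "Use list_messages to retrieve emails"
--         elif "calendar" in query_lower or "meeting" in query_lower:
--             return "Use get_events to check calendar"
--         return "Use search_drive_files to find documents"
--
--     return "Query this source for relevant information"
-- ===== SOURCE B (Python) =====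
-- RULES = {
--     "s3": (
--         [(("content", "read"), "List buckets, then objects, then read specific files")],
--         "Use list_buckets to see available storage",
--     ),
--     "mysql": (
--         [(("table",), "Use list_tables to see database schema")],
--         "Use execute_query with appropriate SELECT statement",
--     ),
--     "jira": (
--         [(("working on", "assigned", "who"),
--           "Use query_jira with natural language to find assignee info")],
--         "Use query_jira tool with the natural language query",
--     ),
--     "shopify": (
--         [(("order",), "Use list_orders with appropriate filters")],
--         "Use list_products or search_products",
--     ),
--     "google_workspace": (
--         [(("email", "gmail"), "Use list_messages to retrieve emails"),
--          (("calendar", "meeting"), "Use get_events to check calendar")],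
--         "Use search_drive_files to find documents",
--     ),
-- }
--
--
-- def _get_suggested_approach(datasource: str, query: str) -> str:
--     """Table-driven: first rule whose any keyword occurs in the lowercased query."""
--     entry = RULES.get(datasource)
--     if entry is None:
--         return "Query this source for relevant information"
--     query_lower = query.lower()
--     rules, default = entry
--     for keywords, message in rules:
--         if any(k in query_lower for k in keywords):
--             return message
--     return default
-- ===== Notes on version B (the rewrite author's own statement) =====
-- stated objective: simpler
-- what changed: Replaced the five-branch if/elif cascade by a single data table RULES mapping each datasource to ordered (keywords, message) rules plus a default, scanned by one generic first-match loop.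
import Mathlib
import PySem

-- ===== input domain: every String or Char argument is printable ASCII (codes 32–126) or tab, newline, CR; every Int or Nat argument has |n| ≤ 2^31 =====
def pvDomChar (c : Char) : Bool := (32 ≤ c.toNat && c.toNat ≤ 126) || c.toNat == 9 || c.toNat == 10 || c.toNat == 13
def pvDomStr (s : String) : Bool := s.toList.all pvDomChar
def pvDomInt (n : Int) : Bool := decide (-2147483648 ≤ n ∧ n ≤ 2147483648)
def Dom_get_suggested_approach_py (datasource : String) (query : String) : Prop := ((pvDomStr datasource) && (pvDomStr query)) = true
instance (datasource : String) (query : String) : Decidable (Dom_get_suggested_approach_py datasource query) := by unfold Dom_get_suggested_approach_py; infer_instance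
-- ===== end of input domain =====

-- B replaces A's if/elif cascade by a datasource→rules table scanned with one first-match loop (simpler).


-- ===== PORT A =====
def get_suggested_approach_py (datasource : String) (query : String) : String :=
  let query_lower := PySem.Str.lower query
  if datasource == "s3" then
    if PySem.Str.isIn "content" query_lower || PySem.Str.isIn "read" query_lower then
      "List buckets, then objects, then read specific files"
    else
      "Use list_buckets to see available storage"
  else if datasource == "mysql" then
    if PySem.Str.isIn "table" query_lower then
      "Use list_tables to see database schema"
    else
      "Use execute_query with appropriate SELECT statement"
  else if datasource == "jira" then
    if ["working on", "assigned", "who"].any (fun name => PySem.Str.isIn name query_lower) then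
      "Use query_jira with natural language to find assignee info"
    else
      "Use query_jira tool with the natural language query"
  else if datasource == "shopify" then
    if PySem.Str.isIn "order" query_lower then
      "Use list_orders with appropriate filters"
    else
      "Use list_products or search_products"
  else if datasource == "google_workspace" then
    if PySem.Str.isIn "email" query_lower || PySem.Str.isIn "gmail" query_lower then
      "Use list_messages to retrieve emails"
    else if PySem.Str.isIn "calendar" query_lower || PySem.Str.isIn "meeting" query_lower then
      "Use get_events to check calendar"
    else
      "Use search_drive_files to find documents"
  else
    "Query this source for relevant information"

-- ===== PORT B =====
-- the RULES table of Source B: datasource ↦ (ordered (keywords, message) rules, default message)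
def pvRules : PySem.Dict String (List (List String × String) × String) :=
  PySem.Dict.mk
    [ ("s3",
        ([(["content", "read"], "List buckets, then objects, then read specific files")],
         "Use list_buckets to see available storage")),
      ("mysql",
        ([(["table"], "Use list_tables to see database schema")],
         "Use execute_query with appropriate SELECT statement")),
      ("jira",
        ([(["working on", "assigned", "who"],
           "Use query_jira with natural language to find assignee info")],
         "Use query_jira tool with the natural language query")),
      ("shopify",
        ([(["order"], "Use list_orders with appropriate filters")],
         "Use list_products or search_products")),
      ("google_workspace",
        ([(["email", "gmail"], "Use list_messages to retrieve emails"),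
          (["calendar", "meeting"], "Use get_events to check calendar")],
         "Use search_drive_files to find documents")) ]

def get_suggested_approach_py_alt (datasource : String) (query : String) : String :=
  match pvRules.get? datasource with
  | none => "Query this source for relevant information"
  | some (rules, dflt) =>
    let query_lower := PySem.Str.lower query
    -- the for-loop of Source B: first rule with a matching keyword, else the default
    match rules.find? (fun r => r.1.any (fun k => PySem.Str.isIn k query_lower)) with
    | some r => r.2
    | none => dflt

-- ===== PRECONDITION & SPEC =====
def Spec_get_suggested_approach_py (datasource : String) (query : String) (out : String) : Prop := out = get_suggested_approach_py_alt datasource query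
instance (datasource : String) (query : String) (out : String) : Decidable (Spec_get_suggested_approach_py datasource query out) := by unfold Spec_get_suggested_approach_py; infer_instance

-- ===== CLAIM (what is proved, stated in full; the proofs are below) =====
def Claim_equal_get_suggested_approach_py : Prop := ∀ (datasource : String) (query : String), Dom_get_suggested_approach_py datasource query → Spec_get_suggested_approach_py datasource query (get_suggested_approach_py datasource query)

-- ===== LEMMAS AND PROOFS =====

-- ===== VERDICT (by name: the statement is the Claim_ definition above) =====
theorem get_suggested_approach_py_spec : Claim_equal_get_suggested_approach_py := by
  intro datasource query _
  unfold Spec_get_suggested_approach_py get_suggested_approach_py get_suggested_approach_py_alt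
  simp only [pvRules, PySem.Dict.get?_mk_cons, beq_iff_eq]
  by_cases h1 : "s3" = datasource
  · subst h1
    cases hc : PySem.Str.isIn "content" (PySem.Str.lower query) <;>
      cases hr : PySem.Str.isIn "read" (PySem.Str.lower query) <;>
      simp_all [List.find?]
  by_cases h2 : "mysql" = datasource
  · subst h2
    cases ht : PySem.Str.isIn "table" (PySem.Str.lower query) <;>
      simp_all [List.find?]
  by_cases h3 : "jira" = datasource
  · subst h3
    cases hw : PySem.Str.isIn "working on" (PySem.Str.lower query) <;>
      cases ha : PySem.Str.isIn "assigned" (PySem.Str.lower query) <;>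
      cases ho : PySem.Str.isIn "who" (PySem.Str.lower query) <;>
      simp_all [List.find?]
  by_cases h4 : "shopify" = datasource
  · subst h4
    cases ho : PySem.Str.isIn "order" (PySem.Str.lower query) <;>
      simp_all [List.find?]
  by_cases h5 : "google_workspace" = datasource
  · subst h5
    cases he : PySem.Str.isIn "email" (PySem.Str.lower query) <;>
      cases hg : PySem.Str.isIn "gmail" (PySem.Str.lower query) <;>
      cases hc : PySem.Str.isIn "calendar" (PySem.Str.lower query) <;>
      cases hm : PySem.Str.isIn "meeting" (PySem.Str.lower query) <;>
      simp_all [List.find?]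
  have h1' : ¬ datasource = "s3" := fun h => h1 h.symm
  have h2' : ¬ datasource = "mysql" := fun h => h2 h.symm
  have h3' : ¬ datasource = "jira" := fun h => h3 h.symm
  have h4' : ¬ datasource = "shopify" := fun h => h4 h.symm
  have h5' : ¬ datasource = "google_workspace" := fun h => h5 h.symm
  simp [h1, h2, h3, h4, h5, h1', h2', h3', h4', h5', PySem.Dict.get?]
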